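-- pv_equiv track=rewrite | github.com/Zachanardo/Intellicrack | phase1_refactor.py | _delete_calculate_deductions
-- ===== SOURCE A (Python) =====
-- def _delete_calculate_deductions(lines: list[str]) -> tuple[list[str], list[str]]:
--     """Delete calculate_deductions function."""
--     changes = []
--     del_start = None
--     brace_count = 0
--
--     for i in range(len(lines)):
--         if 'fn calculate_deductions(func: &FunctionInfo, file_context: &FileContext) -> i32 {' in lines[i]:
--             del_start = i
--             brace_count = 1
--             for j in range(i + 1, len(lines)):
--                 brace_count += lines[j].count('{') - lines[j].count('}')
--                 if brace_count == 0:
--                     changes.append(f"Deleted calculate_deductions(): lines {del_start+1}-{j+1}")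
--                     for _ in range(j - del_start + 1):
--                         lines.pop(del_start)
--                     if del_start < len(lines) and lines[del_start].strip() == '':
--                         lines.pop(del_start)
--                     break
--             break
--     return lines, changes
-- ===== SOURCE B (Python) =====
-- SIG = 'fn calculate_deductions(func: &FunctionInfo, file_context: &FileContext) -> i32 {'
--
-- BEFORE, INSIDE, AFTER_CLOSE, DONE = 0, 1, 2, 3
--
--
-- def _delete_calculate_deductions(lines):
--     """Delete calculate_deductions function (single-pass state machine)."""
--     kept = []
--     buffer = []          # candidate-deleted lines, restored if the block never closes
--     changes = []
--     state = BEFORE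
--     start = 0
--     depth = 0
--     for i, line in enumerate(lines):
--         if state == BEFORE:
--             if SIG in line:
--                 state, start, depth, buffer = INSIDE, i, 1, [line]
--             else:
--                 kept.append(line)
--         elif state == INSIDE:
--             depth += line.count('{') - line.count('}')
--             buffer.append(line)
--             if depth == 0:
--                 changes.append(
--                     f"Deleted calculate_deductions(): lines {start + 1}-{i + 1}")
--                 buffer = []
--                 state = AFTER_CLOSE
--         elif state == AFTER_CLOSE:
--             state = DONE
--             if line.strip() != '':
--                 kept.append(line)
--         else:
--             kept.append(line)
--     kept += buffer
--     lines[:] = kept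
--     return lines, changes
-- ===== Notes on version B (the rewrite author's own statement) =====
-- stated objective: alternative
-- what changed: A uses nested index loops (outer signature scan, inner brace scan) and then deletes in place by repeated pop(del_start); B is a single forward pass with an explicit four-state machine (BEFORE/INSIDE/AFTER_CLOSE/DONE) that streams the lines once and builds the kept list as it goes, buffering the candidate block and restoring it if it never closes.
import Mathlib
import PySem

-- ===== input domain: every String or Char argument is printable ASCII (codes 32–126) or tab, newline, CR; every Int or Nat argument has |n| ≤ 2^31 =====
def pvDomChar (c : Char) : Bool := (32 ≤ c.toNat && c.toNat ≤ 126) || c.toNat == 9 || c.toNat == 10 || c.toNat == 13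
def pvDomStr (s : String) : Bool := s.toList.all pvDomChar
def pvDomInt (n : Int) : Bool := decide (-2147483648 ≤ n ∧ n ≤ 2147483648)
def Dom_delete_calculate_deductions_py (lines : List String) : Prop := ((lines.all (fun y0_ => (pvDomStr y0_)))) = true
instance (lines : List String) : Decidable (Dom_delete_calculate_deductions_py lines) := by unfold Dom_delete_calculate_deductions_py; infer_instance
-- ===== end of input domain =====

-- B replaces A's nested index loops and in-place repeated-pop deletion by a single forward pass
-- with a four-state machine that builds the kept lines as it streams; return-value equivalence is
-- proved (both Pythons also leave `lines` mutated to the same content).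

-- ===== PORT A =====
-- inner loop 'for j in range(i+1, len(lines))': recursion over the suffix, j the absolute index.
-- 'for _ in range(j - del_start + 1): lines.pop(del_start)': pop at an in-range index = eraseIdx.
def pvPopA (n k : Nat) (l : List String) : List String :=
  match n with
  | 0 => l
  | n + 1 => pvPopA n k (l.eraseIdx k)

def pvAInner (full : List String) (del_start j : Nat) (brace : Int) (rest : List String) :
    List String × List String :=
  match rest with
  | [] => (full, [])
  | l :: ls =>
    let b := brace + (PySem.Str.count l "{" : Int) - (PySem.Str.count l "}" : Int)
    if b = 0 then
      let lines2 := pvPopA (j - del_start + 1) del_start full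
      let lines3 :=
        if h : del_start < lines2.length then
          (if PySem.Str.strip lines2[del_start] == "" then lines2.eraseIdx del_start else lines2)
        else lines2
      (lines3, ["Deleted calculate_deductions(): lines " ++
        PySem.Int.toStr ((del_start : Int) + 1) ++ "-" ++ PySem.Int.toStr ((j : Int) + 1)])
    else pvAInner full del_start (j + 1) b ls

-- outer loop 'for i in range(len(lines))': recursion over the suffix, i the absolute index.
def pvAOuter (full : List String) (i : Nat) (rest : List String) : List String × List String :=
  match rest with
  | [] => (full, [])
  | l :: ls =>
    if PySem.Str.isIn "fn calculate_deductions(func: &FunctionInfo, file_context: &FileContext) -> i32 {" l then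
      pvAInner full i (i + 1) 1 ls
    else pvAOuter full (i + 1) ls

def delete_calculate_deductions_py (lines : List String) : List String × List String :=
  pvAOuter lines 0 lines

-- ===== PORT B =====
def pvSIG : String := "fn calculate_deductions(func: &FunctionInfo, file_context: &FileContext) -> i32 {"

-- states: 0 = BEFORE, 1 = INSIDE, 2 = AFTER_CLOSE, 3 = DONE (as in Source B).
-- 'for i, line in enumerate(lines)': structural recursion over the remaining lines, i absolute.
def pvBGo (i : Nat) (rest : List String) (state start : Nat) (depth : Int)
    (kept buffer changes : List String) : List String × List String :=
  match rest with
  | [] => (kept ++ buffer, changes)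
  | line :: ls =>
    if state = 0 then
      if PySem.Str.isIn pvSIG line then
        pvBGo (i + 1) ls 1 i 1 kept [line] changes
      else
        pvBGo (i + 1) ls 0 start depth (kept ++ [line]) buffer changes
    else if state = 1 then
      let d := depth + (PySem.Str.count line "{" : Int) - (PySem.Str.count line "}" : Int)
      if d = 0 then
        pvBGo (i + 1) ls 2 start d kept []
          (changes ++ ["Deleted calculate_deductions(): lines " ++
            PySem.Int.toStr ((start : Int) + 1) ++ "-" ++ PySem.Int.toStr ((i : Int) + 1)])
      else
        pvBGo (i + 1) ls 1 start d kept (buffer ++ [line]) changes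
    else if state = 2 then
      if PySem.Str.strip line == "" then
        pvBGo (i + 1) ls 3 start depth kept buffer changes
      else
        pvBGo (i + 1) ls 3 start depth (kept ++ [line]) buffer changes
    else
      pvBGo (i + 1) ls 3 start depth (kept ++ [line]) buffer changes

def delete_calculate_deductions_py_alt (lines : List String) : List String × List String :=
  pvBGo 0 lines 0 0 0 [] [] []

-- ===== PRECONDITION & SPEC =====
def Spec_delete_calculate_deductions_py (lines : List String) (out : List String × List String) : Prop := out = delete_calculate_deductions_py_alt lines
instance (lines : List String) (out : List String × List String) : Decidable (Spec_delete_calculate_deductions_py lines out) := by unfold Spec_delete_calculate_deductions_py; infer_instance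

-- ===== CLAIM (what is proved, stated in full; the proofs are below) =====
def Claim_equal_delete_calculate_deductions_py : Prop := ∀ (lines : List String), Dom_delete_calculate_deductions_py lines → Spec_delete_calculate_deductions_py lines (delete_calculate_deductions_py lines)

-- ===== LEMMAS AND PROOFS =====

-- a common normal form both ports reduce to
def pvFindSig (i : Nat) (rest : List String) : Option Nat :=
  match rest with
  | [] => none
  | l :: ls => if PySem.Str.isIn pvSIG l then some i else pvFindSig (i + 1) ls

def pvFindClose (j : Nat) (depth : Int) (rest : List String) : Option Nat :=
  match rest with
  | [] => none
  | l :: ls =>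
    let d := depth + (PySem.Str.count l "{" : Int) - (PySem.Str.count l "}" : Int)
    if d = 0 then some j else pvFindClose (j + 1) d ls

def pvSkipBlank (l : List String) : List String :=
  match l with
  | [] => []
  | x :: xs => if PySem.Str.strip x == "" then xs else x :: xs

def pvMsg (s e : Nat) : String :=
  "Deleted calculate_deductions(): lines " ++
    PySem.Int.toStr ((s : Int) + 1) ++ "-" ++ PySem.Int.toStr ((e : Int) + 1)

lemma pvFindSig_bounds : ∀ (rest : List String) (i s : Nat),
    pvFindSig i rest = some s → i ≤ s ∧ s < i + rest.length := by
  intro rest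
  induction rest with
  | nil => intro i s h; simp [pvFindSig] at h
  | cons l ls ih =>
    intro i s h
    rw [pvFindSig] at h
    split at h
    · cases h; simp
    · have := ih (i + 1) s h; simp only [List.length_cons]; omega

lemma pvFindClose_bounds : ∀ (rest : List String) (j : Nat) (d : Int) (e : Nat),
    pvFindClose j d rest = some e → j ≤ e ∧ e < j + rest.length := by
  intro rest
  induction rest with
  | nil => intro j d e h; simp [pvFindClose] at h
  | cons l ls ih =>
    intro j d e h
    rw [pvFindClose] at h
    split at h
    · cases h; simp
    · have := ih (j + 1) _ e h; simp only [List.length_cons]; omega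

-- ---- A reduces to the normal form ----

lemma pvPopA_eq (n : Nat) : ∀ (k : Nat) (l : List String), k + n ≤ l.length →
    pvPopA n k l = l.take k ++ l.drop (k + n) := by
  induction n with
  | zero => intro k l _; simp [pvPopA]
  | succ n ih =>
    intro k l h
    have herase : l.eraseIdx k = l.take k ++ l.drop (k + 1) := by
      rw [List.eraseIdx_eq_take_drop_succ]
    have hlen : (l.eraseIdx k).length = l.length - 1 := by
      rw [List.length_eraseIdx_of_lt (by omega)]
    have htk : (l.take k).length = k := by rw [List.length_take]; omega
    rw [pvPopA, ih k (l.eraseIdx k) (by omega), herase]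
    have e1 : (l.take k ++ l.drop (k + 1)).take k = l.take k := by
      rw [List.take_append_of_le_length (by omega)]
      rw [List.take_take]
      simp
    have e2 : (l.take k ++ l.drop (k + 1)).drop (k + n) = l.drop (k + (n + 1)) := by
      rw [List.drop_append]
      rw [List.drop_eq_nil_of_le (by omega)]
      rw [htk, List.drop_drop]
      rw [List.nil_append]
      congr 1
      omega
    rw [e1, e2]

lemma pvInner_eq (full : List String) (ds : Nat) : ∀ (rest : List String) (j : Nat) (d : Int),
    pvAInner full ds j d rest =
      match pvFindClose j d rest with
      | none => (full, [])
      | some e =>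
        (let lines2 := pvPopA (e - ds + 1) ds full
         let lines3 :=
           if h : ds < lines2.length then
             (if PySem.Str.strip lines2[ds] == "" then lines2.eraseIdx ds else lines2)
           else lines2
         (lines3, [pvMsg ds e])) := by
  intro rest
  induction rest with
  | nil => intro j d; simp [pvAInner, pvFindClose]
  | cons l ls ih =>
    intro j d
    rw [pvAInner, pvFindClose]
    by_cases hb : d + (PySem.Str.count l "{" : Int) - (PySem.Str.count l "}" : Int) = 0
    · simp only [hb, if_true]; rfl
    · simp only [if_neg hb]
      exact ih (j + 1) _

lemma pvOuter_eq (full : List String) : ∀ (rest : List String) (i : Nat),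
    rest = full.drop i →
    pvAOuter full i rest =
      match pvFindSig i rest with
      | none => (full, [])
      | some s => pvAInner full s (s + 1) 1 (full.drop (s + 1)) := by
  intro rest
  induction rest with
  | nil => intro i _; simp [pvAOuter, pvFindSig]
  | cons l ls ih =>
    intro i hdrop
    have hls : ls = full.drop (i + 1) := by
      have : full.drop (i + 1) = (full.drop i).tail := by
        rw [← List.drop_drop]; simp
      rw [this, ← hdrop]; rfl
    rw [pvAOuter, pvFindSig, pvSIG]
    by_cases hc : PySem.Str.isIn "fn calculate_deductions(func: &FunctionInfo, file_context: &FileContext) -> i32 {" l = true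
    · simp only [hc, if_true, hls]
    · simp only [Bool.not_eq_true] at hc
      simp only [hc, Bool.false_eq_true, if_false]
      exact ih (i + 1) hls

-- A's close branch in take/drop form
lemma pvA_close_form (full : List String) (s e : Nat) (hs : s ≤ e) (he : e < full.length) :
    (let lines2 := full.take s ++ full.drop (e + 1)
     if h : s < lines2.length then
       (if PySem.Str.strip lines2[s] == "" then lines2.eraseIdx s else lines2)
     else lines2) = full.take s ++ pvSkipBlank (full.drop (e + 1)) := by
  have hslen : (full.take s).length = s := by rw [List.length_take]; omega
  cases hd : full.drop (e + 1) with
  | nil =>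
    rw [List.append_nil, dif_neg (by rw [hslen]; omega)]
    simp [pvSkipBlank]
  | cons x xs =>
    have hlt : s < (full.take s ++ x :: xs).length := by
      rw [List.length_append, hslen, List.length_cons]; omega
    rw [dif_pos hlt, List.getElem_append_right (le_of_eq hslen)]
    rw [List.eraseIdx_append_of_length_le (le_of_eq hslen)]
    simp only [hslen, Nat.sub_self, List.getElem_cons_zero, List.eraseIdx_zero, List.tail_cons,
      pvSkipBlank]
    split_ifs <;> rfl

-- ---- B reduces to the normal form ----

lemma pvB_done : ∀ (rest : List String) (i s : Nat) (d : Int) (kept ch : List String),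
    pvBGo i rest 3 s d kept [] ch = (kept ++ rest, ch) := by
  intro rest
  induction rest with
  | nil => intro i s d kept ch; simp [pvBGo]
  | cons l ls ih =>
    intro i s d kept ch
    show pvBGo (i + 1) ls 3 s d (kept ++ [l]) [] ch = (kept ++ l :: ls, ch)
    rw [ih]
    simp

lemma pvB_after : ∀ (rest : List String) (i s : Nat) (d : Int) (kept ch : List String),
    pvBGo i rest 2 s d kept [] ch = (kept ++ pvSkipBlank rest, ch) := by
  intro rest i s d kept ch
  cases rest with
  | nil => simp [pvBGo, pvSkipBlank]
  | cons l ls =>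
    show (if PySem.Str.strip l == "" then pvBGo (i + 1) ls 3 s d kept [] ch
          else pvBGo (i + 1) ls 3 s d (kept ++ [l]) [] ch) = (kept ++ pvSkipBlank (l :: ls), ch)
    simp only [pvSkipBlank]
    by_cases hb : (PySem.Str.strip l == "") = true
    · rw [if_pos hb, if_pos hb, pvB_done]
    · rw [if_neg hb, if_neg hb, pvB_done]
      simp

lemma pvB_inside : ∀ (rest : List String) (j start : Nat) (d : Int) (kept buffer : List String),
    pvBGo j rest 1 start d kept buffer [] =
      match pvFindClose j d rest with
      | none => (kept ++ (buffer ++ rest), [])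
      | some e => (kept ++ pvSkipBlank (rest.drop (e + 1 - j)), [pvMsg start e]) := by
  intro rest
  induction rest with
  | nil => intro j start d kept buffer; simp [pvBGo, pvFindClose]
  | cons l ls ih =>
    intro j start d kept buffer
    show (if d + (PySem.Str.count l "{" : Int) - (PySem.Str.count l "}" : Int) = 0 then
            pvBGo (j + 1) ls 2 start (d + (PySem.Str.count l "{" : Int) - (PySem.Str.count l "}" : Int)) kept []
              ([] ++ ["Deleted calculate_deductions(): lines " ++
                PySem.Int.toStr ((start : Int) + 1) ++ "-" ++ PySem.Int.toStr ((j : Int) + 1)])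
          else pvBGo (j + 1) ls 1 start (d + (PySem.Str.count l "{" : Int) - (PySem.Str.count l "}" : Int)) kept (buffer ++ [l]) []) =
      match pvFindClose j d (l :: ls) with
      | none => (kept ++ (buffer ++ l :: ls), [])
      | some e => (kept ++ pvSkipBlank ((l :: ls).drop (e + 1 - j)), [pvMsg start e])
    by_cases hb : d + (PySem.Str.count l "{" : Int) - (PySem.Str.count l "}" : Int) = 0
    · have hcl : pvFindClose j d (l :: ls) = some j := by
        rw [pvFindClose]
        simp only [if_pos hb]
      rw [hcl, if_pos hb]
      show _ = (kept ++ pvSkipBlank ((l :: ls).drop (j + 1 - j)), [pvMsg start j])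
      rw [pvB_after]
      have h1 : j + 1 - j = 1 := by omega
      rw [h1, List.drop_one, List.tail_cons]
      rfl
    · have hcl : pvFindClose j d (l :: ls) =
          pvFindClose (j + 1) (d + (PySem.Str.count l "{" : Int) - (PySem.Str.count l "}" : Int)) ls := by
        rw [pvFindClose]
        simp only [if_neg hb]
      rw [hcl, if_neg hb, ih]
      cases hcl2 : pvFindClose (j + 1) (d + (PySem.Str.count l "{" : Int) - (PySem.Str.count l "}" : Int)) ls with
      | none => simp
      | some e =>
        have hbd := pvFindClose_bounds ls (j + 1) _ e hcl2
        simp only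
        have h1 : e + 1 - j = (e + 1 - (j + 1)) + 1 := by omega
        rw [h1, List.drop_succ_cons]

lemma pvB_before (full : List String) : ∀ (rest : List String) (i : Nat),
    rest = full.drop i →
    pvBGo i rest 0 0 0 (full.take i) [] [] =
      match pvFindSig i rest with
      | none => (full, [])
      | some s =>
        match pvFindClose (s + 1) 1 (full.drop (s + 1)) with
        | none => (full, [])
        | some e => (full.take s ++ pvSkipBlank (full.drop (e + 1)), [pvMsg s e]) := by
  intro rest
  induction rest with
  | nil =>
    intro i hdrop
    have hlen : full.length ≤ i := by
      have := congrArg List.length hdrop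
      simp [List.length_drop] at this
      omega
    simp [pvBGo, pvFindSig, List.take_of_length_le hlen]
  | cons l ls ih =>
    intro i hdrop
    have hls : ls = full.drop (i + 1) := by
      have : full.drop (i + 1) = (full.drop i).tail := by
        rw [← List.drop_drop]; simp
      rw [this, ← hdrop]; rfl
    have hi : full[i]? = some l := by
      rw [← List.head?_drop, ← hdrop]; rfl
    have htake : full.take (i + 1) = full.take i ++ [l] := by
      rw [List.take_succ, hi]; rfl
    show (if PySem.Str.isIn pvSIG l = true then pvBGo (i + 1) ls 1 i 1 (full.take i) [l] []
          else pvBGo (i + 1) ls 0 0 0 (full.take i ++ [l]) [] []) =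
      match (if PySem.Str.isIn pvSIG l = true then some i else pvFindSig (i + 1) ls) with
      | none => (full, [])
      | some s =>
        match pvFindClose (s + 1) 1 (full.drop (s + 1)) with
        | none => (full, [])
        | some e => (full.take s ++ pvSkipBlank (full.drop (e + 1)), [pvMsg s e])
    by_cases hc : PySem.Str.isIn pvSIG l = true
    · rw [if_pos hc, if_pos hc]
      show pvBGo (i + 1) ls 1 i 1 (full.take i) [l] [] =
        match pvFindClose (i + 1) 1 (full.drop (i + 1)) with
        | none => (full, [])
        | some e => (full.take i ++ pvSkipBlank (full.drop (e + 1)), [pvMsg i e])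
      rw [pvB_inside, ← hls]
      cases hcl : pvFindClose (i + 1) 1 ls with
      | none =>
        simp only
        have hfull : full.take i ++ ([l] ++ ls) = full := by
          rw [List.singleton_append, hdrop, List.take_append_drop]
        rw [hfull]
      | some e =>
        have hbd := pvFindClose_bounds ls (i + 1) 1 e hcl
        simp only
        have h1 : ls.drop (e + 1 - (i + 1)) = full.drop (e + 1) := by
          rw [hls, List.drop_drop]
          congr 1
          omega
        rw [h1]
    · rw [if_neg hc, if_neg hc, ← htake]
      exact ih (i + 1) hls

-- ===== VERDICT (by name: the statement is the Claim_ definition above) =====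
theorem delete_calculate_deductions_py_spec : Claim_equal_delete_calculate_deductions_py := by
  intro lines _
  unfold Spec_delete_calculate_deductions_py delete_calculate_deductions_py delete_calculate_deductions_py_alt
  rw [pvOuter_eq lines lines 0 (by simp)]
  have hB : pvBGo 0 lines 0 0 0 [] [] [] = pvBGo 0 lines 0 0 0 (lines.take 0) [] [] := by simp
  rw [hB, pvB_before lines lines 0 (by simp)]
  cases hsig : pvFindSig 0 lines with
  | none => simp
  | some s =>
    simp only
    have hs := pvFindSig_bounds lines 0 s hsig
    rw [pvInner_eq lines s (lines.drop (s + 1)) (s + 1) 1]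
    cases hcl : pvFindClose (s + 1) 1 (lines.drop (s + 1)) with
    | none => simp
    | some e =>
      have he := pvFindClose_bounds (lines.drop (s + 1)) (s + 1) 1 e hcl
      rw [List.length_drop] at he
      simp only
      rw [pvPopA_eq (e - s + 1) s lines (by omega)]
      have harith : s + (e - s + 1) = e + 1 := by omega
      rw [harith]
      rw [pvA_close_form lines s e (by omega) (by omega)]
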